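-- pv_equiv track=rewrite | github.com/trevorgrabham/AoC23 | Day10/Part2/main.py | containedDown
-- ===== SOURCE A (Python) =====
-- def containedDown(partOfLoop, pipes, row, col):
--   numBoundries = 0
--   foundF = False
--   found7 = False
--   for r in range(row+1, len(pipes)):
--     if partOfLoop[r][col] and pipes[r][col] == '-':
--       numBoundries += 1
--     elif partOfLoop[r][col] and pipes[r][col] == 'F':
--       foundF = True
--     elif partOfLoop[r][col] and pipes[r][col] == '7':
--       found7 = True
--     elif partOfLoop[r][col] and pipes[r][col] == 'J':
--       if foundF:
--         numBoundries += 1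
--         foundF = False
--       else:
--         found7 = False
--     elif partOfLoop[r][col] and pipes[r][col] == 'L':
--       if found7:
--         numBoundries += 1
--         found7 = False
--       else:
--         foundF = False
--   return numBoundries%2 != 0
-- ===== SOURCE B (Python) =====
-- def containedDown(partOfLoop, pipes, row, col):
--   # Extract the column's cells once, then run a table-driven 4-state DFA
--   # (bit0 = open F, bit1 = open 7) that accumulates a crossing-parity bit.
--   column = [pipes[r][col] for r in range(row+1, len(pipes)) if partOfLoop[r][col]]
--   TRANS = {
--     '-': [(0, 1), (1, 1), (2, 1), (3, 1)],
--     'F': [(1, 0), (1, 0), (3, 0), (3, 0)],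
--     '7': [(2, 0), (3, 0), (2, 0), (3, 0)],
--     'J': [(0, 0), (0, 1), (0, 0), (2, 1)],
--     'L': [(0, 0), (0, 0), (0, 1), (1, 1)],
--   }
--   state, parity = 0, 0
--   for ch in column:
--     rowT = TRANS.get(ch)
--     if rowT is not None:
--       state, step = rowT[state]
--       parity = (parity + step) % 2
--   return parity == 1
-- ===== Notes on version B (the rewrite author's own statement) =====
-- stated objective: alternative
-- what changed: Replaces the inline loop with its two boolean flags, integer counter and five-way elif chain by a one-pass comprehension that extracts the column's cells, followed by a table-driven 4-state DFA (dict of transition rows) that accumulates a single parity bit instead of counting boundaries.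
import Mathlib
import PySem

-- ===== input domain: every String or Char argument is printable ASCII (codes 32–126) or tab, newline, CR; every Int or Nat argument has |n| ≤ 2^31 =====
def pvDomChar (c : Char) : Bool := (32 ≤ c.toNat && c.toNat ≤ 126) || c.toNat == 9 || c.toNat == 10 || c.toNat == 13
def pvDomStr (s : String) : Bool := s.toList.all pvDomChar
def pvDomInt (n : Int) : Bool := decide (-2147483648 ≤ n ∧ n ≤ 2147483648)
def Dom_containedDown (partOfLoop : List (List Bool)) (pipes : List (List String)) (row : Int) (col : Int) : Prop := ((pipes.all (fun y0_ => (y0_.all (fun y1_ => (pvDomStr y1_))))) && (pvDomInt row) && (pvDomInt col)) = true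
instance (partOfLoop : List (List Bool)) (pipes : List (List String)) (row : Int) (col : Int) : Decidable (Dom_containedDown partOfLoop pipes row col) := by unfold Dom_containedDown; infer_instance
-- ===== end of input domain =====

-- B replaces A's two-flag counting loop by a column-extraction pass followed by a
-- table-driven 4-state DFA accumulating a parity bit (objective: alternative).

-- ===== PORT A =====
-- partOfLoop[r][col] (total form; Pre_ guarantees the indexing succeeds)
def pvCellB (partOfLoop : List (List Bool)) (col r : Int) : Bool :=
  (PySem.List.pyGet? ((PySem.List.pyGet? partOfLoop r).getD []) col).getD false

-- pipes[r][col] (total form; Pre_ guarantees the indexing succeeds whenever it is reached)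
def pvCellS (pipes : List (List String)) (col r : Int) : String :=
  (PySem.List.pyGet? ((PySem.List.pyGet? pipes r).getD []) col).getD ""

-- the body of A's for-loop, on state (numBoundries, foundF, found7)
def pvBodyA (g : Bool) (ch : String) (s : Int × Bool × Bool) : Int × Bool × Bool :=
  if g && (ch == "-") then (s.1 + 1, s.2.1, s.2.2)
  else if g && (ch == "F") then (s.1, true, s.2.2)
  else if g && (ch == "7") then (s.1, s.2.1, true)
  else if g && (ch == "J") then
    (if s.2.1 then (s.1 + 1, false, s.2.2) else (s.1, s.2.1, false))
  else if g && (ch == "L") then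
    (if s.2.2 then (s.1 + 1, s.2.1, false) else (s.1, false, s.2.2))
  else s

def containedDown (partOfLoop : List (List Bool)) (pipes : List (List String)) (row : Int) (col : Int) : Bool :=
  let res := (PySem.List.pyRange (row + 1) (PySem.List.len pipes) 1).foldl
    (fun s r => pvBodyA (pvCellB partOfLoop col r) (pvCellS pipes col r) s)
    (0, false, false)
  decide (PySem.Int.mod res.1 2 ≠ 0)

-- ===== PORT B =====
-- the transition table TRANS of Source B: pipe char -> per-state (new state, parity step)
def pvTrans : PySem.Dict String (List (Int × Int)) :=
  PySem.Dict.ofList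
    [("-", [(0, 1), (1, 1), (2, 1), (3, 1)]),
     ("F", [(1, 0), (1, 0), (3, 0), (3, 0)]),
     ("7", [(2, 0), (3, 0), (2, 0), (3, 0)]),
     ("J", [(0, 0), (0, 1), (0, 0), (2, 1)]),
     ("L", [(0, 0), (0, 0), (0, 1), (1, 1)])]

-- the body of Source B's for-loop on (state, parity)
def pvStepB (s : Int × Int) (ch : String) : Int × Int :=
  match PySem.Dict.get? pvTrans ch with
  | none => s
  | some rowT =>
      let t := (PySem.List.pyGet? rowT s.1).getD (s.1, 0)  -- rowT[state]; state is always 0..3 so the default is never used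
      (t.1, PySem.Int.mod (s.2 + t.2) 2)

def containedDown_alt (partOfLoop : List (List Bool)) (pipes : List (List String)) (row : Int) (col : Int) : Bool :=
  let column := ((PySem.List.pyRange (row + 1) (PySem.List.len pipes) 1).filter
      (fun r => pvCellB partOfLoop col r)).map (fun r => pvCellS pipes col r)
  let fin := column.foldl pvStepB (0, 0)
  fin.2 == 1

-- ===== PRECONDITION & SPEC =====
-- Pre_ excludes exactly the IndexError inputs: for every scanned r, partOfLoop[r][col]
-- must exist, and when it is True, pipes[r][col] must exist too (A short-circuits otherwise).
-- (the first disjunct is the empty scan; in the second, the leading bound only restates that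
-- partOfLoop[row+1] must exist — it keeps the quantified range small enough to decide)
def Pre_containedDown (partOfLoop : List (List Bool)) (pipes : List (List String)) (row : Int) (col : Int) : Prop :=
  (PySem.List.len pipes ≤ row + 1) ∨
  (-(PySem.List.len partOfLoop) ≤ row + 1 ∧
    ∀ r ∈ PySem.List.pyRange (row + 1) (PySem.List.len pipes) 1,
      ((PySem.List.pyGet? partOfLoop r).bind (fun bs => PySem.List.pyGet? bs col)).isSome = true ∧
      (((PySem.List.pyGet? partOfLoop r).bind (fun bs => PySem.List.pyGet? bs col)) = some true →
        ((PySem.List.pyGet? pipes r).bind (fun ss => PySem.List.pyGet? ss col)).isSome = true))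
instance (partOfLoop : List (List Bool)) (pipes : List (List String)) (row : Int) (col : Int) : Decidable (Pre_containedDown partOfLoop pipes row col) := by unfold Pre_containedDown; infer_instance

def pvWitness_containedDown : List (List Bool) × List (List String) × Int × Int :=
  ([[true], [true], [false]], [["F"], ["J"], ["."]], -1, 0)

def Spec_containedDown (partOfLoop : List (List Bool)) (pipes : List (List String)) (row : Int) (col : Int) (out : Bool) : Prop := out = containedDown_alt partOfLoop pipes row col
instance (partOfLoop : List (List Bool)) (pipes : List (List String)) (row : Int) (col : Int) (out : Bool) : Decidable (Spec_containedDown partOfLoop pipes row col out) := by unfold Spec_containedDown; infer_instance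

-- ===== CLAIM (what is proved, stated in full; the proofs are below) =====
def Claim_equal_containedDown : Prop := ∀ (partOfLoop : List (List Bool)) (pipes : List (List String)) (row : Int) (col : Int), Dom_containedDown partOfLoop pipes row col → Pre_containedDown partOfLoop pipes row col → Spec_containedDown partOfLoop pipes row col (containedDown partOfLoop pipes row col)

-- ===== LEMMAS AND PROOFS =====

-- encode A's two flags as B's DFA state (bit0 = foundF, bit1 = found7)
def pvEnc (fF f7 : Bool) : Int := (if f7 then 2 else 0) + (if fF then 1 else 0)

lemma pvMod2_cases (n : Int) : PySem.Int.mod n 2 = 0 ∨ PySem.Int.mod n 2 = 1 := by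
  rw [PySem.Int.mod_eq_emod_of_pos (by norm_num)]
  omega

lemma pvMod2_add (n k : Int) :
    PySem.Int.mod (PySem.Int.mod n 2 + k) 2 = PySem.Int.mod (n + k) 2 := by
  rw [PySem.Int.mod_eq_emod_of_pos (by norm_num), PySem.Int.mod_eq_emod_of_pos (by norm_num),
    PySem.Int.mod_eq_emod_of_pos (by norm_num)]
  omega

-- pvTrans lookups on the five key characters, evaluated once
lemma pvTrans_dash : PySem.Dict.get? pvTrans "-" = some [(0, 1), (1, 1), (2, 1), (3, 1)] := rfl
lemma pvTrans_F : PySem.Dict.get? pvTrans "F" = some [(1, 0), (1, 0), (3, 0), (3, 0)] := rfl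
lemma pvTrans_7 : PySem.Dict.get? pvTrans "7" = some [(2, 0), (3, 0), (2, 0), (3, 0)] := rfl
lemma pvTrans_J : PySem.Dict.get? pvTrans "J" = some [(0, 0), (0, 1), (0, 0), (2, 1)] := rfl
lemma pvTrans_L : PySem.Dict.get? pvTrans "L" = some [(0, 0), (0, 0), (0, 1), (1, 1)] := rfl

-- any other character is absent from the table
lemma pvTrans_get?_none (ch : String) (h1 : ¬ ch = "-") (h2 : ¬ ch = "F") (h3 : ¬ ch = "7")
    (h4 : ¬ ch = "J") (h5 : ¬ ch = "L") : PySem.Dict.get? pvTrans ch = none := by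
  have hitems : pvTrans.items = [("-", [(0, 1), (1, 1), (2, 1), (3, 1)]),
     ("F", [(1, 0), (1, 0), (3, 0), (3, 0)]), ("7", [(2, 0), (3, 0), (2, 0), (3, 0)]),
     ("J", [(0, 0), (0, 1), (0, 0), (2, 1)]), ("L", [(0, 0), (0, 0), (0, 1), (1, 1)])] := rfl
  have e1 : ("-" == ch) = false := by simpa using Ne.symm h1
  have e2 : ("F" == ch) = false := by simpa using Ne.symm h2
  have e3 : ("7" == ch) = false := by simpa using Ne.symm h3
  have e4 : ("J" == ch) = false := by simpa using Ne.symm h4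
  have e5 : ("L" == ch) = false := by simpa using Ne.symm h5
  simp [PySem.Dict.get?, hitems, List.find?, e1, e2, e3, e4, e5]

-- one DFA step of B simulates one (guard-true) step of A
lemma pvStepB_simulates (ch : String) (n : Int) (fF f7 : Bool) :
    pvStepB (pvEnc fF f7, PySem.Int.mod n 2) ch =
      (pvEnc (pvBodyA true ch (n, fF, f7)).2.1 (pvBodyA true ch (n, fF, f7)).2.2,
       PySem.Int.mod (pvBodyA true ch (n, fF, f7)).1 2) := by
  by_cases h1 : ch = "-"
  · subst h1
    cases fF <;> cases f7 <;>
      norm_num [pvStepB, pvBodyA, pvEnc, pvTrans_dash, PySem.List.pyGet?, PySem.List.pyIdx?, (by decide : Int.toNat 2 = 2), (by decide : Int.toNat 3 = 3),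
        pvMod2_add]
  by_cases h2 : ch = "F"
  · subst h2
    cases fF <;> cases f7 <;>
      norm_num [pvStepB, pvBodyA, pvEnc, pvTrans_F, PySem.List.pyGet?, PySem.List.pyIdx?, (by decide : Int.toNat 2 = 2), (by decide : Int.toNat 3 = 3),
        pvMod2_add, h1]
  by_cases h3 : ch = "7"
  · subst h3
    cases fF <;> cases f7 <;>
      norm_num [pvStepB, pvBodyA, pvEnc, pvTrans_7, PySem.List.pyGet?, PySem.List.pyIdx?, (by decide : Int.toNat 2 = 2), (by decide : Int.toNat 3 = 3),
        pvMod2_add, h1, h2]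
  by_cases h4 : ch = "J"
  · subst h4
    cases fF <;> cases f7 <;>
      norm_num [pvStepB, pvBodyA, pvEnc, pvTrans_J, PySem.List.pyGet?, PySem.List.pyIdx?, (by decide : Int.toNat 2 = 2), (by decide : Int.toNat 3 = 3),
        pvMod2_add, h1, h2, h3]
  by_cases h5 : ch = "L"
  · subst h5
    cases fF <;> cases f7 <;>
      norm_num [pvStepB, pvBodyA, pvEnc, pvTrans_L, PySem.List.pyGet?, PySem.List.pyIdx?, (by decide : Int.toNat 2 = 2), (by decide : Int.toNat 3 = 3),
        pvMod2_add, h1, h2, h3, h4]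
  simp [pvStepB, pvBodyA, pvTrans_get?_none ch h1 h2 h3 h4 h5, h1, h2, h3, h4, h5]

-- main loop invariant: B's fold over the extracted column tracks A's fold over the rows
lemma pvLoop (g : Int → Bool) (f : Int → String) :
    ∀ (l : List Int) (n : Int) (fF f7 : Bool),
      ((l.filter g).map f).foldl pvStepB (pvEnc fF f7, PySem.Int.mod n 2) =
        (pvEnc (l.foldl (fun s r => pvBodyA (g r) (f r) s) (n, fF, f7)).2.1
               (l.foldl (fun s r => pvBodyA (g r) (f r) s) (n, fF, f7)).2.2,
         PySem.Int.mod (l.foldl (fun s r => pvBodyA (g r) (f r) s) (n, fF, f7)).1 2) := by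
  intro l
  induction l with
  | nil => intro n fF f7; simp
  | cons r l ih =>
    intro n fF f7
    by_cases hg : g r
    · simp only [List.filter_cons, hg, List.map_cons, List.foldl_cons, ite_true,
        pvStepB_simulates]
      exact ih _ _ _
    · have hg' : g r = false := by simpa using hg
      have hA : pvBodyA false (f r) (n, fF, f7) = (n, fF, f7) := by simp [pvBodyA]
      simp only [List.filter_cons, hg', List.foldl_cons, ite_false,
        Bool.false_eq_true]
      rw [hA]
      exact ih _ _ _

lemma pvFinal (m : Int) : decide (PySem.Int.mod m 2 ≠ 0) = (PySem.Int.mod m 2 == 1) := by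
  rcases pvMod2_cases m with h | h <;> rw [h] <;> decide

-- ===== VERDICT (by name: the statement is the Claim_ definition above) =====
theorem containedDown_spec : Claim_equal_containedDown := by
  intro partOfLoop pipes row col _hDom _hPre
  unfold Spec_containedDown
  dsimp only [containedDown, containedDown_alt]
  rw [(by decide : ((0 : Int), (0 : Int)) = (pvEnc false false, PySem.Int.mod 0 2)),
    pvLoop (fun r => pvCellB partOfLoop col r) (fun r => pvCellS pipes col r)
      (PySem.List.pyRange (row + 1) (PySem.List.len pipes) 1) 0 false false]
  dsimp only
  exact pvFinal _
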